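-- pv_equiv track=rewrite | github.com/billzhao1030/mllm-eval | nav_src/scripts/data_process.py | observation_to_list
-- ===== SOURCE A (Python) =====
-- def observation_to_list(observation):
--     # Split the observation string into lines
--     lines = observation.split('\n')
--
--     # Initialize an empty list to store the heading strings
--     observation_list = []
--
--     # Initialize a variable to store the current heading string
--     current_heading_str = ''
--
--     # Iterate through the lines
--     for line in lines:
--         # If the line starts with 'heading', add the current heading string to the list (without the heading part) and reset it
--         if line.startswith('heading'):
--             if current_heading_str:
--                 observation_list.append(current_heading_str.strip())
--             current_heading_str = ''
--         else:
--             # If the line doesn't start with 'heading', add it to the current heading string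
--             current_heading_str += line + '\n'
--
--     # Add the last heading string to the list (without the heading part)
--     observation_list.append(current_heading_str.strip())
--
--     return observation_list
-- ===== SOURCE B (Python) =====
-- def observation_to_list(observation):
--     # Different algorithm: locate all heading-marker positions, then slice the
--     # line list between consecutive markers; finally join/strip each segment,
--     # dropping empty intermediate segments (the last segment is always kept).
--     lines = observation.split('\n')
--     cuts = [i for i, line in enumerate(lines) if line.startswith('heading')]
--     bounds = [-1] + cuts + [len(lines)]
--     segs = [lines[b + 1:e] for b, e in zip(bounds, bounds[1:])]
--     return ['\n'.join(s).strip() for s in segs[:-1] if s] + ['\n'.join(segs[-1]).strip()]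
-- ===== Notes on version B (the rewrite author's own statement) =====
-- stated objective: alternative
-- what changed: B replaces A's fused stateful pass (a running string accumulator that is flushed and filtered at each heading line) with an index-based algorithm: it first computes the list of heading-marker positions, forms slice bounds from them, slices the line list between consecutive bounds, and finally joins/strips each slice, dropping empty intermediate segments.
import Mathlib
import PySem

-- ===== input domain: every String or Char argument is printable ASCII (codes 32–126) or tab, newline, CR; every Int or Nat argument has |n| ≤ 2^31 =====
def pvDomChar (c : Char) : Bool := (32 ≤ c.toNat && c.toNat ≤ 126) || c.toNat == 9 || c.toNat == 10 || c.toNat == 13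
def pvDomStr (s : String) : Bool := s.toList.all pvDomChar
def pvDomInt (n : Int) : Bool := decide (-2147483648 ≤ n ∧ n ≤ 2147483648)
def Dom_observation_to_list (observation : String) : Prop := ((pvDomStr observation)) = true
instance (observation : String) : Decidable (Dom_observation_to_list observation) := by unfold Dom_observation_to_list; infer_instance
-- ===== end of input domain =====

-- B uses a different algorithm: it locates all heading-marker positions first and slices the
-- line list between consecutive markers, instead of A's fused stateful accumulator pass; same values.

-- ===== PORT A =====
-- fused loop: a running string accumulator, stripped non-empty segments collected as it goes
def observation_to_list (observation : String) : List String :=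
  let lines := ((PySem.Str.split? observation "\n").getD [])
  let st := lines.foldl (fun (st : List String × String) line =>
    if PySem.Str.startswith line "heading" then
      (if st.2 ≠ "" then st.1 ++ [PySem.Str.strip st.2] else st.1, "")
    else
      (st.1, st.2 ++ line ++ "\n")) ([], "")
  st.1 ++ [PySem.Str.strip st.2]

-- ===== PORT B =====
-- marker positions → bounds → slices between consecutive bounds → join/strip/filter
-- (zip(bounds, bounds[1:]) is List.zip bounds bounds.tail; `if s` on a list is s ≠ [])
def observation_to_list_alt (observation : String) : List String :=
  let lines := ((PySem.Str.split? observation "\n").getD [])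
  let cuts := ((PySem.List.enumerate lines 0).filter
      (fun p => PySem.Str.startswith p.2 "heading")).map (fun p => p.1)
  let bounds := [(-1 : Int)] ++ cuts ++ [(lines.length : Int)]
  let segs := (bounds.zip bounds.tail).map
      (fun p => PySem.List.slice lines (some (p.1 + 1)) (some p.2))
  ((segs.dropLast.filter (fun s => s ≠ ([] : List String))).map
      (fun s => PySem.Str.strip (PySem.Str.join "\n" s)))
    ++ [PySem.Str.strip (PySem.Str.join "\n" (segs.getLastD []))]

-- ===== PRECONDITION & SPEC =====
def Spec_observation_to_list (observation : String) (out : List String) : Prop := out = observation_to_list_alt observation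
instance (observation : String) (out : List String) : Decidable (Spec_observation_to_list observation out) := by unfold Spec_observation_to_list; infer_instance

-- ===== CLAIM =====
def Claim_equal_observation_to_list : Prop := ∀ (observation : String), Dom_observation_to_list observation → Spec_observation_to_list observation (observation_to_list observation)

-- ===== LEMMAS AND PROOFS =====

-- the segments of a line list, split at heading-marker lines (common reference form)
def pvSegsOf : List String → List (List String)
  | [] => [[]]
  | l :: ls =>
    if PySem.Str.startswith l "heading" then [] :: pvSegsOf ls
    else (pvSegsOf ls).modifyHead (l :: ·)

theorem pvSegsOf_cons (l : String) (ls : List String) :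
    pvSegsOf (l :: ls) =
      if PySem.Str.startswith l "heading" then [] :: pvSegsOf ls
      else (pvSegsOf ls).modifyHead (l :: ·) := rfl

-- A's raw accumulated string for a segment
def pvRaw (g : List String) : String := g.foldl (fun a l => a ++ l ++ "\n") ""

-- A's segment strings, as a recursion (intermediate between A's fold and pvSegsOf)
def pvStrSegs (cur : String) : List String → List String
  | [] => [cur]
  | l :: ls =>
    if PySem.Str.startswith l "heading" then cur :: pvStrSegs "" ls
    else pvStrSegs (cur ++ l ++ "\n") ls

theorem pvStrSegs_cons (cur l : String) (ls : List String) :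
    pvStrSegs cur (l :: ls) =
      if PySem.Str.startswith l "heading" then cur :: pvStrSegs "" ls
      else pvStrSegs (cur ++ l ++ "\n") ls := rfl

theorem pvSegsOf_ne_nil (ls : List String) : pvSegsOf ls ≠ [] := by
  cases ls with
  | nil => simp [pvSegsOf]
  | cons l ls =>
    rw [pvSegsOf_cons]
    split
    · simp
    · intro h
      have := congrArg List.length h
      simp [List.length_modifyHead] at this
      exact pvSegsOf_ne_nil ls this

theorem pvStrSegs_ne_nil (cur : String) (ls : List String) : pvStrSegs cur ls ≠ [] := by
  induction ls generalizing cur with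
  | nil => simp [pvStrSegs]
  | cons l ls ih => rw [pvStrSegs_cons]; split <;> simp [ih]

theorem pvRaw_from (g : List String) : ∀ cur : String,
    g.foldl (fun a l => a ++ l ++ "\n") cur = cur ++ pvRaw g := by
  induction g with
  | nil => intro cur; simp [pvRaw]
  | cons l ls ih =>
    intro cur
    rw [List.foldl_cons, ih]
    have h2 : pvRaw (l :: ls) = ("" ++ l ++ "\n") ++ pvRaw ls := by
      show List.foldl _ _ (l :: ls) = _
      rw [List.foldl_cons]; exact ih _
    rw [h2]
    simp [String.append_assoc]

theorem pvRaw_cons (l : String) (ls : List String) :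
    pvRaw (l :: ls) = l ++ "\n" ++ pvRaw ls := by
  have h2 : pvRaw (l :: ls) = ("" ++ l ++ "\n") ++ pvRaw ls := by
    show List.foldl _ _ (l :: ls) = _
    rw [List.foldl_cons]; exact pvRaw_from ls _
  rw [h2]; simp [String.append_assoc]

theorem pvRaw_concat (g : List String) (l : String) :
    pvRaw (g ++ [l]) = pvRaw g ++ l ++ "\n" := by
  show List.foldl _ _ (g ++ [l]) = _
  rw [List.foldl_append]
  rfl

theorem pvRaw_eq_empty_iff (g : List String) : pvRaw g = "" ↔ g = [] := by
  cases g with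
  | nil => simp [pvRaw]
  | cons l ls =>
    rw [pvRaw_cons]
    constructor
    · intro h
      have := congrArg String.length h
      simp [String.length_append] at this
    · intro h; cases h

theorem pvChars_strip_newline (cs : List Char) :
    PySem.Chars.strip (cs ++ ['\n']) = PySem.Chars.strip cs := by
  unfold PySem.Chars.strip PySem.Chars.lstrip PySem.Chars.rstrip
  rw [List.dropWhile_append]
  split
  · next h =>
    rw [List.isEmpty_iff] at h
    rw [h]
    simp [PySem.Chars.isspace]
  · next h =>
    rw [List.reverse_append]
    simp only [List.reverse_cons, List.reverse_nil, List.nil_append]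
    norm_num [show PySem.Chars.isspace '\n' = true from by decide]

theorem pvStrip_newline (s : String) :
    PySem.Str.strip (s ++ "\n") = PySem.Str.strip s := by
  have h1 : (PySem.Str.strip (s ++ "\n")).toList = (PySem.Str.strip s).toList := by
    rw [PySem.Str.toList_strip, PySem.Str.toList_strip, String.toList_append,
      show ("\n" : String).toList = ['\n'] from by decide, pvChars_strip_newline]
  calc PySem.Str.strip (s ++ "\n") = String.ofList (PySem.Str.strip (s ++ "\n")).toList := by
        rw [String.ofList_toList]
    _ = _ := by rw [h1, String.ofList_toList]

theorem pvJoin_singleton (l : String) : PySem.Str.join "\n" [l] = l := by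
  have h1 : (PySem.Str.join "\n" [l]).toList = l.toList := by
    rw [PySem.Str.toList_join]; simp [PySem.Chars.join_singleton]
  calc PySem.Str.join "\n" [l] = String.ofList (PySem.Str.join "\n" [l]).toList := by
        rw [String.ofList_toList]
    _ = l := by rw [h1, String.ofList_toList]

theorem pvJoin_cons_cons (l m : String) (rest : List String) :
    PySem.Str.join "\n" (l :: m :: rest) = l ++ "\n" ++ PySem.Str.join "\n" (m :: rest) := by
  have h1 : (PySem.Str.join "\n" (l :: m :: rest)).toList
      = (l ++ "\n" ++ PySem.Str.join "\n" (m :: rest)).toList := by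
    rw [PySem.Str.toList_join]
    simp only [List.map_cons, PySem.Chars.join_cons_cons, String.toList_append,
      PySem.Str.toList_join, List.map_cons]
  calc PySem.Str.join "\n" (l :: m :: rest)
      = String.ofList (PySem.Str.join "\n" (l :: m :: rest)).toList := by rw [String.ofList_toList]
    _ = _ := by rw [h1, String.ofList_toList]

theorem pvRaw_join (g : List String) (h : g ≠ []) :
    pvRaw g = PySem.Str.join "\n" g ++ "\n" := by
  induction g with
  | nil => exact absurd rfl h
  | cons l ls ih =>
    cases ls with
    | nil => rw [pvRaw_cons, pvJoin_singleton]; simp [pvRaw]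
    | cons m rest =>
      rw [pvRaw_cons, ih (by simp), pvJoin_cons_cons]
      simp [String.append_assoc]

theorem pvStrip_raw (g : List String) :
    PySem.Str.strip (pvRaw g) = PySem.Str.strip (PySem.Str.join "\n" g) := by
  cases g with
  | nil =>
    have h0 : PySem.Str.join "\n" ([] : List String) = "" := by
      calc PySem.Str.join "\n" []
          = String.ofList (PySem.Str.join "\n" ([] : List String)).toList := by
            rw [String.ofList_toList]
        _ = "" := by rw [PySem.Str.toList_join]; simp [PySem.Chars.join_nil]
    rw [h0]; rfl
  | cons l ls =>
    rw [pvRaw_join _ (by simp), pvStrip_newline]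

theorem pvGetLastD_irrel {α : Type} (l : List α) (h : l ≠ []) (a b : α) :
    l.getLastD a = l.getLastD b := by
  cases l with
  | nil => exact absurd rfl h
  | cons x xs => rw [List.getLastD_cons, List.getLastD_cons]

-- A's fold, characterised by pvStrSegs
theorem pvA_char (ls : List String) : ∀ (acc : List String) (cur : String),
    (ls.foldl (fun (st : List String × String) line =>
      if PySem.Str.startswith line "heading" then
        (if st.2 ≠ "" then st.1 ++ [PySem.Str.strip st.2] else st.1, "")
      else
        (st.1, st.2 ++ line ++ "\n")) (acc, cur))
    = (acc ++ ((pvStrSegs cur ls).dropLast.filter (fun s => s ≠ "")).map PySem.Str.strip,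
       (pvStrSegs cur ls).getLastD "") := by
  induction ls with
  | nil => intro acc cur; simp [pvStrSegs]
  | cons l ls ih =>
    intro acc cur
    rw [List.foldl_cons]
    by_cases h : PySem.Str.startswith l "heading" = true
    · simp only [h, if_true]
      rw [pvStrSegs_cons, if_pos h]
      rw [List.dropLast_cons_of_ne_nil (pvStrSegs_ne_nil "" ls)]
      rw [List.getLastD_cons, pvGetLastD_irrel _ (pvStrSegs_ne_nil "" ls) cur ""]
      by_cases hc : cur = ""
      · subst hc
        simp only [ne_eq, not_true_eq_false, if_false]
        rw [ih]
        simp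
      · simp only [ne_eq, hc, not_false_eq_true, if_true]
        rw [ih]
        simp [hc]
    · simp only [h]
      rw [pvStrSegs_cons, if_neg h]
      simpa using ih acc (cur ++ l ++ "\n")

-- pvStrSegs is pvSegsOf mapped through pvRaw (with the pending prefix merged into the head)
theorem pvStrSegs_raw (ls : List String) : ∀ g : List String,
    pvStrSegs (pvRaw g) ls = ((pvSegsOf ls).modifyHead (g ++ ·)).map pvRaw := by
  induction ls with
  | nil => intro g; simp [pvStrSegs, pvSegsOf]
  | cons l ls ih =>
    intro g
    rw [pvStrSegs_cons, pvSegsOf_cons]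
    by_cases h : PySem.Str.startswith l "heading" = true
    · rw [if_pos h, if_pos h, List.modifyHead_cons, List.map_cons]
      have h0 := ih []
      rw [show pvRaw [] = "" from rfl] at h0
      rw [h0]
      have hid : (fun x : List String => [] ++ x) = id := by funext x; simp
      rw [hid, List.modifyHead_id]
      simp
    · rw [if_neg h, if_neg h]
      rw [show pvRaw g ++ l ++ "\n" = pvRaw (g ++ [l]) from (pvRaw_concat g l).symm]
      rw [ih (g ++ [l]), List.modifyHead_modifyHead]
      have hfun : ((fun x : List String => g ++ x) ∘ (l :: ·)) = (fun x => (g ++ [l]) ++ x) := by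
        funext x; simp
      rw [hfun]

-- ========== B side: markers and slices ==========

-- marker positions as Nat indices
def pvCutsN : List String → List Nat
  | [] => []
  | l :: ls =>
    if PySem.Str.startswith l "heading" then 0 :: (pvCutsN ls).map (· + 1)
    else (pvCutsN ls).map (· + 1)

theorem pvCutsN_cons (l : String) (ls : List String) :
    pvCutsN (l :: ls) =
      if PySem.Str.startswith l "heading" then 0 :: (pvCutsN ls).map (· + 1)
      else (pvCutsN ls).map (· + 1) := rfl

theorem pvCuts_eq (ls : List String) : ∀ s : Int,
    ((PySem.List.enumerate ls s).filter (fun p => PySem.Str.startswith p.2 "heading")).map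
        (fun p => p.1)
      = (pvCutsN ls).map (fun n : Nat => (n : Int) + s) := by
  induction ls with
  | nil => intro s; simp [PySem.List.enumerate_nil, pvCutsN]
  | cons l ls ih =>
    intro s
    rw [PySem.List.enumerate_cons, List.filter_cons, pvCutsN_cons]
    by_cases h : PySem.Str.startswith l "heading" = true
    · rw [if_pos (by exact h), if_pos h]
      rw [List.map_cons, List.map_cons, ih (s + 1), List.map_map]
      congr 1
      · simp
      · apply List.map_congr_left; intro n _; simp; ring
    · rw [if_neg (by simpa using h), if_neg h]
      rw [ih (s + 1), List.map_map]
      apply List.map_congr_left; intro n _; simp; ring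

-- bounds minus the leading -1
def pvTail (ls : List String) : List Int :=
  (pvCutsN ls).map (fun n : Nat => (n : Int)) ++ [(ls.length : Int)]

-- B's slices between consecutive bounds
def pvSlicesOf (ls : List String) : List (List String) :=
  (((-1 : Int) :: pvTail ls).zip (pvTail ls)).map
    (fun p => PySem.List.slice ls (some (p.1 + 1)) (some p.2))

theorem pvTail_shift_piece (ls : List String) :
    ((pvCutsN ls).map (· + 1)).map (fun n : Nat => (n : Int)) ++ [((ls.length + 1 : Nat) : Int)]
      = (pvTail ls).map (· + 1) := by
  unfold pvTail
  rw [List.map_append, List.map_map, List.map_map]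
  congr 1

theorem pvTail_cons_pos (l : String) (ls : List String)
    (h : PySem.Str.startswith l "heading" = true) :
    pvTail (l :: ls) = 0 :: (pvTail ls).map (· + 1) := by
  show (pvCutsN (l :: ls)).map _ ++ _ = _
  rw [pvCutsN_cons, if_pos h, List.map_cons, List.cons_append, List.length_cons]
  rw [pvTail_shift_piece]
  norm_num

theorem pvTail_cons_neg (l : String) (ls : List String)
    (h : ¬ PySem.Str.startswith l "heading" = true) :
    pvTail (l :: ls) = (pvTail ls).map (· + 1) := by
  show (pvCutsN (l :: ls)).map _ ++ _ = _
  rw [pvCutsN_cons, if_neg h, List.length_cons]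
  rw [pvTail_shift_piece]

theorem pvTail_ne_nil (ls : List String) : pvTail ls ≠ [] := by simp [pvTail]

theorem pvTail_nonneg (ls : List String) : ∀ x ∈ pvTail ls, 0 ≤ x := by
  intro x hx
  rcases List.mem_append.mp hx with h | h
  · obtain ⟨n, _, rfl⟩ := List.mem_map.mp h; positivity
  · simp at h; subst h; positivity

theorem pvSlice_shift (l : String) (ls : List String) (a b : Int)
    (ha : -1 ≤ a) (hb : 0 ≤ b) :
    PySem.List.slice (l :: ls) (some (a + 1 + 1)) (some (b + 1))
      = PySem.List.slice ls (some (a + 1)) (some b) := by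
  obtain ⟨m, hm⟩ : ∃ m : Nat, a + 1 = (m : Int) := ⟨(a + 1).toNat, by omega⟩
  obtain ⟨n, hn⟩ : ∃ n : Nat, b = (n : Int) := ⟨b.toNat, by omega⟩
  rw [hm, hn, show ((m : Int) + 1) = ((m + 1 : Nat) : Int) from by omega,
    show ((n : Int) + 1) = ((n + 1 : Nat) : Int) from by omega,
    PySem.List.slice_natCast, PySem.List.slice_natCast]
  rw [List.drop_succ_cons]
  congr 1
  omega

theorem pvSlice_first (l : String) (ls : List String) (b : Int) (hb : 0 ≤ b) :
    PySem.List.slice (l :: ls) (some (-1 + 1)) (some (b + 1))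
      = l :: PySem.List.slice ls (some (-1 + 1)) (some b) := by
  obtain ⟨n, hn⟩ : ∃ n : Nat, b = (n : Int) := ⟨b.toNat, by omega⟩
  rw [hn, show (-1 + 1 : Int) = ((0 : Nat) : Int) from by decide,
    show ((n : Int) + 1) = ((n + 1 : Nat) : Int) from by omega,
    PySem.List.slice_natCast, PySem.List.slice_natCast]
  simp [List.take_succ_cons]

-- the shifted pairs, sliced on (l :: ls), are the original pairs sliced on ls
theorem pvPairs_shift (l : String) (ls : List String) (ps : List (Int × Int))
    (h : ∀ p ∈ ps, -1 ≤ p.1 ∧ 0 ≤ p.2) :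
    (ps.map (Prod.map (· + 1) (· + 1))).map
        (fun p => PySem.List.slice (l :: ls) (some (p.1 + 1)) (some p.2))
      = ps.map (fun p => PySem.List.slice ls (some (p.1 + 1)) (some p.2)) := by
  rw [List.map_map]
  apply List.map_congr_left
  intro p hp
  obtain ⟨h1, h2⟩ := h p hp
  simp only [Function.comp_apply]
  exact pvSlice_shift l ls p.1 p.2 h1 h2

theorem pvSlices_eq (ls : List String) : pvSlicesOf ls = pvSegsOf ls := by
  induction ls with
  | nil =>
    show pvSlicesOf [] = [[]]
    simp [pvSlicesOf, pvTail, pvCutsN, PySem.List.slice]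
  | cons l ls ih =>
    have hmem : ∀ p ∈ (((-1 : Int) :: pvTail ls).zip (pvTail ls)), -1 ≤ p.1 ∧ 0 ≤ p.2 := by
      intro p hp
      obtain ⟨hp1, hp2⟩ := List.of_mem_zip hp
      constructor
      · rcases List.mem_cons.mp hp1 with h | h
        · omega
        · have := pvTail_nonneg ls _ h; omega
      · exact pvTail_nonneg ls _ hp2
    by_cases h : PySem.Str.startswith l "heading" = true
    · rw [pvSegsOf_cons, if_pos h]
      unfold pvSlicesOf
      rw [pvTail_cons_pos l ls h]
      rw [List.zip_cons_cons, List.map_cons]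
      congr 1
      rw [show ((0 : Int) :: (pvTail ls).map (· + 1)) = ((-1 : Int) :: pvTail ls).map (· + 1) from by simp]
      rw [List.zip_map, pvPairs_shift l ls _ hmem]
      exact ih
    · rw [pvSegsOf_cons, if_neg h]
      unfold pvSlicesOf
      rw [pvTail_cons_neg l ls h]
      obtain ⟨t0, T₁, hT⟩ : ∃ t0 T₁, pvTail ls = t0 :: T₁ := by
        cases hT : pvTail ls with
        | nil => exact absurd hT (pvTail_ne_nil ls)
        | cons a b => exact ⟨a, b, rfl⟩
      have ht0 : 0 ≤ t0 := pvTail_nonneg ls t0 (by rw [hT]; exact List.mem_cons_self)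
      rw [hT, List.map_cons, List.zip_cons_cons, List.map_cons]
      rw [show ((t0 + 1) :: T₁.map (· + 1)) = ((t0 :: T₁).map (· + 1)) from by simp]
      rw [List.zip_map, pvPairs_shift l ls _ (by
        intro p hp
        obtain ⟨hp1, hp2⟩ := List.of_mem_zip hp
        have h1 := pvTail_nonneg ls p.1 (by rw [hT]; exact hp1)
        have h2 := pvTail_nonneg ls p.2 (by rw [hT]; exact List.mem_cons_of_mem _ hp2)
        omega)]
      rw [show ((-1 : Int), t0 + 1).1 = -1 from rfl, show ((-1 : Int), t0 + 1).2 = t0 + 1 from rfl]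
      rw [pvSlice_first l ls t0 ht0]
      rw [← ih]
      unfold pvSlicesOf
      rw [hT, List.zip_cons_cons, List.map_cons, List.modifyHead_cons]

theorem pvGetLastD_map_raw (S : List (List String)) : ∀ d : List String,
    (S.map pvRaw).getLastD (pvRaw d) = pvRaw (S.getLastD d) := by
  induction S with
  | nil => intro d; rfl
  | cons x xs ih =>
    intro d
    rw [List.map_cons, List.getLastD_cons, List.getLastD_cons]
    exact ih x

-- the two final shapes agree, for any segment list S
theorem pvFinal_eq (S : List (List String)) :
    ((S.map pvRaw).dropLast.filter (fun s => s ≠ "")).map PySem.Str.strip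
      ++ [PySem.Str.strip ((S.map pvRaw).getLastD "")]
    = ((S.dropLast.filter (fun s => s ≠ ([] : List String))).map
        (fun s => PySem.Str.strip (PySem.Str.join "\n" s)))
      ++ [PySem.Str.strip (PySem.Str.join "\n" (S.getLastD []))] := by
  congr 1
  · rw [← List.map_dropLast, List.filter_map, List.map_map]
    rw [List.filter_congr (fun g _ =>
      show ((fun s => decide (s ≠ "")) ∘ pvRaw) g = decide (g ≠ ([] : List String)) from by
        simp [Function.comp_apply, pvRaw_eq_empty_iff])]
    apply List.map_congr_left
    intro g _
    simpa using pvStrip_raw g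
  · rw [show ("" : String) = pvRaw [] from rfl, pvGetLastD_map_raw, pvStrip_raw]

-- ===== VERDICT =====
theorem observation_to_list_spec : Claim_equal_observation_to_list := by
  intro observation _
  unfold Spec_observation_to_list observation_to_list observation_to_list_alt
  simp only []
  generalize ((PySem.Str.split? observation "\n").getD []) = lines
  -- A side
  rw [pvA_char lines [] ""]
  simp only [List.nil_append]
  -- B cuts = pvCutsN, bounds = -1 :: pvTail
  have hcuts : ((PySem.List.enumerate lines 0).filter
      (fun p => PySem.Str.startswith p.2 "heading")).map (fun p => p.1)
      = (pvCutsN lines).map (fun n : Nat => (n : Int)) := by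
    rw [pvCuts_eq lines 0]
    apply List.map_congr_left
    intro n _
    simp
  rw [hcuts]
  have hb : (([(-1 : Int)] ++ (pvCutsN lines).map (fun n : Nat => (n : Int))
      ++ [(lines.length : Int)]) : List Int) = (-1 : Int) :: pvTail lines := by
    simp [pvTail]
  rw [hb]
  rw [show ((-1 : Int) :: pvTail lines).tail = pvTail lines from rfl]
  -- B slices = pvSegsOf
  have hsl : (((-1 : Int) :: pvTail lines).zip (pvTail lines)).map
      (fun p => PySem.List.slice lines (some (p.1 + 1)) (some p.2)) = pvSegsOf lines := by
    rw [← pvSlices_eq]; rfl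
  rw [hsl]
  -- A strSegs = pvSegsOf mapped through pvRaw
  have hstr : pvStrSegs "" lines = (pvSegsOf lines).map pvRaw := by
    have h0 := pvStrSegs_raw lines []
    rw [show pvRaw [] = "" from rfl] at h0
    rw [h0]
    have hid : (fun x : List String => [] ++ x) = id := by funext x; simp
    rw [hid, List.modifyHead_id]
    rfl
  rw [hstr]
  exact pvFinal_eq (pvSegsOf lines)
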